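-- pv_equiv track=rewrite | github.com/Vinicius007700/Hackathon-Nasa | backend/explorar_causas_kps.py | get_event_chain
-- ===== SOURCE A (Python) =====
-- from collections import deque
--
-- def get_event_chain(start_id, master_cache):
--     """
--     A partir de um ID inicial, navega por todos os linkedEvents para encontrar a cadeia completa.
--     """
--     if start_id not in master_cache:
--         return {start_id}
--
--     chain = set()
--     queue = deque([start_id]) # Usamos uma fila para a busca
--
--     while queue:
--         current_id = queue.popleft()
--         if current_id in chain:
--             continue
--
--         chain.add(current_id)
--
--         event_details = master_cache.get(current_id, {})
--         for linked_event in event_details.get('linkedEvents', []):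
--             linked_id = linked_event.get('activityID')
--             if linked_id:
--                 queue.append(linked_id)
--     return chain
-- ===== SOURCE B (Python) =====
-- def get_event_chain(start_id, master_cache):
--     """
--     A partir de um ID inicial, navega por todos os linkedEvents para encontrar a cadeia completa.
--     Bounded fixpoint saturation (Bellman-Ford style): instead of a BFS queue, re-expand the
--     whole ordered chain len(master_cache) times; len(master_cache) rounds always reach the
--     full reachable set, since every round extends the set by one more hop of linked keys.
--     """
--     if start_id not in master_cache:
--         return {start_id}
--
--     def links(node):
--         return [e.get('activityID')
--                 for e in master_cache.get(node, {}).get('linkedEvents', [])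
--                 if e.get('activityID')]
--
--     chain = [start_id]
--     for _ in range(len(master_cache)):
--         chain = list(dict.fromkeys(chain + [lid for node in chain for lid in links(node)]))
--     return set(chain)
-- ===== Notes on version B (the rewrite author's own statement) =====
-- stated objective: alternative
-- what changed: Replaces the visited-set BFS queue with a Bellman-Ford-style bounded saturation: the ordered chain list is re-expanded wholesale by one hop, len(master_cache) times, with no queue, no visited bookkeeping and no per-node dequeue loop.
import Mathlib
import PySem

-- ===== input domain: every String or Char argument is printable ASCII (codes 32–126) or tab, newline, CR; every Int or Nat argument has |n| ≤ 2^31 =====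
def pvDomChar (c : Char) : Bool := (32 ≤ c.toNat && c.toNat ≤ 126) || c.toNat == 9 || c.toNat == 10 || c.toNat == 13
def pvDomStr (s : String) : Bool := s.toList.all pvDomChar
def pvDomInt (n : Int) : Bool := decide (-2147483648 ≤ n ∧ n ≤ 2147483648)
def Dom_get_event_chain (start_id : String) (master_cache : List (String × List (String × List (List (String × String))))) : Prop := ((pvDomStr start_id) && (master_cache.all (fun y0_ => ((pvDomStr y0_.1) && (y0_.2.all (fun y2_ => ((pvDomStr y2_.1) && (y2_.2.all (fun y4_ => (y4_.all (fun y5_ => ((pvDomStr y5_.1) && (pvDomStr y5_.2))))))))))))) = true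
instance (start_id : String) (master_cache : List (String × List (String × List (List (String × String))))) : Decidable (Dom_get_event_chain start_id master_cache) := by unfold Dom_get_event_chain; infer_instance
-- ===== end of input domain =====

-- B replaces the BFS queue with a bounded whole-chain saturation (len(master_cache) one-hop expansion rounds); same returned set, proved below.

-- truthy activityIDs linked from `node` (B's `links` helper; also used by A's termination measure)
def pvLinks (master_cache : List (String × List (String × List (List (String × String))))) (node : String) : List String :=
  (PySem.Dict.getD (PySem.Dict.mk (PySem.Dict.getD (PySem.Dict.mk master_cache) node [])) "linkedEvents" []).filterMap
    (fun le => (PySem.Dict.get? (PySem.Dict.mk le) "activityID").bind (fun s => if s = "" then none else some s))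

-- termination measure for A's loop: total pending link-list length over keys not yet in `chain`
def pvW (master_cache : List (String × List (String × List (List (String × String))))) (chain : List String) : Nat :=
  (((PySem.List.dedup (master_cache.map Prod.fst)).filter
      (fun k => !(PySem.Set.contains chain k))).map (fun k => (pvLinks master_cache k).length)).sum

-- A's inner for-loop over linkedEvents, as the obvious structural recursion (queue.append per truthy activityID)
def pvPush (q : List String) : List (List (String × String)) → List String
  | [] => q
  | le :: more =>
    match PySem.Dict.get? (PySem.Dict.mk le) "activityID" with
    | some lid => if lid = "" then pvPush q more else pvPush (q ++ [lid]) more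
    | none => pvPush q more

-- the append loop appends exactly pvLinks (cited by pvBFS's decreasing_by and the proofs below)
theorem pvPush_links (master_cache : List (String × List (String × List (List (String × String))))) (node : String) (q : List String) :
    pvPush q (PySem.Dict.getD (PySem.Dict.mk (PySem.Dict.getD (PySem.Dict.mk master_cache) node [])) "linkedEvents" [])
      = q ++ pvLinks master_cache node := by
  unfold pvLinks
  generalize (PySem.Dict.getD (PySem.Dict.mk (PySem.Dict.getD (PySem.Dict.mk master_cache) node [])) "linkedEvents" []) = linked
  induction linked generalizing q with
  | nil => simp [pvPush]
  | cons le more ih =>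
    rw [pvPush, List.filterMap_cons]
    cases h : PySem.Dict.get? (PySem.Dict.mk le) "activityID" with
    | none => simp [ih]
    | some lid =>
      by_cases hl : lid = "" <;> simp [hl, ih]

-- adding a fresh node to `chain` pays for its links (cited by the decreasing_by of A's loop and the proofs below)
theorem pvW_add (master_cache : List (String × List (String × List (List (String × String))))) (chain : List String) (x : String)
    (hx : PySem.Set.contains chain x = false) :
    pvW master_cache (PySem.Set.add chain x) + (pvLinks master_cache x).length ≤ pvW master_cache chain := by
  have hxmem : x ∉ chain := by simpa [PySem.Set.contains_eq_listContains] using hx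
  rw [PySem.Set.add_of_not_mem hxmem]
  unfold pvW
  have hfun : ∀ k, (!(PySem.Set.contains (chain ++ [x]) k)) = ((!(PySem.Set.contains chain k)) && (!(k == x))) := by
    intro k
    simp [PySem.Set.contains_eq_listContains]
    by_cases h : k = x <;> simp [h]
  have hfilt : (PySem.List.dedup (master_cache.map Prod.fst)).filter (fun k => !(PySem.Set.contains (chain ++ [x]) k))
      = ((PySem.List.dedup (master_cache.map Prod.fst)).filter (fun k => !(PySem.Set.contains chain k))).filter (fun k => !(k == x)) := by
    rw [List.filter_filter]
    exact List.filter_congr (fun k _ => by rw [hfun k, Bool.and_comm])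
  rw [hfilt]
  set l := (PySem.List.dedup (master_cache.map Prod.fst)).filter (fun k => !(PySem.Set.contains chain k)) with hl
  have hnd : l.Nodup := (PySem.List.nodup_dedup _).filter _
  by_cases hxk : x ∈ PySem.List.dedup (master_cache.map Prod.fst)
  · have hxl : x ∈ l := by
      rw [hl]
      exact List.mem_filter.mpr ⟨hxk, by simpa using hxmem⟩
    have herase : l.filter (fun k => !(k == x)) = l.erase x := by
      rw [hnd.erase_eq_filter]
      exact (List.filter_congr (fun k _ => by simp [bne, Bool.beq_eq_decide_eq])).symm
    rw [herase]
    have hperm : List.Perm (l.map (fun k => (pvLinks master_cache k).length))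
        ((pvLinks master_cache x).length :: (l.erase x).map (fun k => (pvLinks master_cache k).length)) :=
      (List.perm_cons_erase hxl).map _
    have := hperm.sum_eq
    simp only [List.sum_cons] at this
    omega
  · have hlinks : pvLinks master_cache x = [] := by
      have hget : PySem.Dict.get? (PySem.Dict.mk master_cache) x = none := by
        rw [PySem.Dict.get?_eq_none_iff_not_mem_keys]
        simpa [pysem, PySem.List.mem_dedup] using hxk
      unfold pvLinks
      rw [PySem.Dict.getD_of_get?_eq_none _ _ hget]
      simp [pysem]
    rw [hlinks]
    simp only [List.length_nil, Nat.add_zero]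
    have hsub : (List.filter (fun k => !(k == x)) l).Sublist l := List.filter_sublist
    have hs := (hsub.map (fun k => (pvLinks master_cache k).length)).sum_le_sum (by simp)
    omega

-- ===== PORT A =====
def pvBFS (master_cache : List (String × List (String × List (List (String × String))))) (chain : PySem.Set String) (queue : List String) : List String :=
  match queue with
  | [] => chain
  | current_id :: rest =>
    if hcur : PySem.Set.contains chain current_id then
      pvBFS master_cache chain rest
    else
      let chain' := PySem.Set.add chain current_id
      let event_details := PySem.Dict.getD (PySem.Dict.mk master_cache) current_id []
      let queue' := pvPush rest (PySem.Dict.getD (PySem.Dict.mk event_details) "linkedEvents" [])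
      pvBFS master_cache chain' queue'
termination_by pvW master_cache chain + queue.length
decreasing_by
  · simp
  · have h' : PySem.Set.contains chain current_id = false := by simpa using hcur
    have := pvW_add master_cache chain current_id h'
    simp only [pvPush_links, List.length_append, List.length_cons]
    omega

def get_event_chain (start_id : String) (master_cache : List (String × List (String × List (List (String × String))))) : List String :=
  if !(PySem.Dict.contains (PySem.Dict.mk master_cache) start_id) then
    PySem.Set.add PySem.Set.empty start_id
  else
    pvBFS master_cache PySem.Set.empty [start_id]

-- ===== PORT B =====
-- one saturation round: chain = list(dict.fromkeys(chain + [lid for node in chain for lid in links(node)]))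
def pvGrow (master_cache : List (String × List (String × List (List (String × String))))) (chain : List String) : List String :=
  PySem.List.dedup (chain ++ chain.flatMap (fun node => pvLinks master_cache node))

-- `for _ in range(k): chain = pvGrow …`
def pvSatRounds (master_cache : List (String × List (String × List (List (String × String))))) : Nat → List String → List String
  | 0, chain => chain
  | k + 1, chain => pvSatRounds master_cache k (pvGrow master_cache chain)

def get_event_chain_alt (start_id : String) (master_cache : List (String × List (String × List (List (String × String))))) : List String :=
  if !(PySem.Dict.contains (PySem.Dict.mk master_cache) start_id) then
    PySem.Set.add PySem.Set.empty start_id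
  else
    pvSatRounds master_cache (PySem.Dict.size (PySem.Dict.mk master_cache)) [start_id]

-- ===== PRECONDITION & SPEC =====
def Spec_get_event_chain (start_id : String) (master_cache : List (String × List (String × List (List (String × String))))) (out : List String) : Prop := out = get_event_chain_alt start_id master_cache
instance (start_id : String) (master_cache : List (String × List (String × List (List (String × String))))) (out : List String) : Decidable (Spec_get_event_chain start_id master_cache out) := by unfold Spec_get_event_chain; infer_instance

-- ===== CLAIM (what is proved, stated in full; the proofs are below) =====
def Claim_equal_get_event_chain : Prop := ∀ (start_id : String) (master_cache : List (String × List (String × List (List (String × String))))), Dom_get_event_chain start_id master_cache → Spec_get_event_chain start_id master_cache (get_event_chain start_id master_cache)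

-- ===== LEMMAS AND PROOFS =====

-- every link of every member of `chain` lies in `L`
def pvLinked (master_cache : List (String × List (String × List (List (String × String))))) (chain L : List String) : Prop :=
  ∀ x ∈ chain, ∀ y ∈ pvLinks master_cache x, y ∈ L

-- one level-synchronous pass (proof-only bridge between the BFS queue and the saturation rounds)
def pvStep (master_cache : List (String × List (String × List (List (String × String))))) (chain : PySem.Set String) : List String → PySem.Set String × List String
  | [] => (chain, [])
  | node :: rest =>
    if PySem.Set.contains chain node then
      pvStep master_cache chain rest
    else
      let r := pvStep master_cache (PySem.Set.add chain node) rest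
      (r.1, pvLinks master_cache node ++ r.2)

theorem pvStepW (master_cache : List (String × List (String × List (List (String × String))))) :
    ∀ (q : List String) (chain : PySem.Set String),
      pvW master_cache (pvStep master_cache chain q).1 + (pvStep master_cache chain q).2.length ≤ pvW master_cache chain := by
  intro q
  induction q with
  | nil => intro chain; simp [pvStep]
  | cons node rest ih =>
    intro chain
    by_cases h : node ∈ chain
    · simpa [pvStep, h] using ih chain
    · have h' : PySem.Set.contains chain node = false := by simpa using h
      have h1 := ih (PySem.Set.add chain node)
      have h2 := pvW_add master_cache chain node h'
      simp only [pvStep]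
      rw [if_neg (by simpa using h)]
      simp only [List.length_append]
      omega

def pvLoop (master_cache : List (String × List (String × List (List (String × String))))) (chain : PySem.Set String) (frontier : List String) : List String :=
  match frontier with
  | [] => chain
  | _ :: _ =>
    let r := pvStep master_cache chain frontier
    pvLoop master_cache r.1 r.2
termination_by pvW master_cache chain + frontier.length
decreasing_by
  have := pvStepW master_cache frontier chain
  simp only [List.length_cons] at *
  omega

-- processing a whole batch `q` of the FIFO queue equals one pvStep pass
theorem pvBFS_batch (master_cache : List (String × List (String × List (List (String × String))))) :
    ∀ (q : List String) (chain : PySem.Set String) (tail : List String),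
      pvBFS master_cache chain (q ++ tail)
        = pvBFS master_cache (pvStep master_cache chain q).1 (tail ++ (pvStep master_cache chain q).2) := by
  intro q
  induction q with
  | nil => intro chain tail; simp [pvStep]
  | cons x rest ih =>
    intro chain tail
    rw [List.cons_append, pvBFS]
    by_cases h : x ∈ chain
    · rw [dif_pos (by simpa using h)]
      rw [pvStep, if_pos (by simpa using h)]
      exact ih chain tail
    · rw [dif_neg (by simpa using h)]
      simp only [pvPush_links]
      rw [pvStep, if_neg (by simpa using h)]
      rw [List.append_assoc, ih (PySem.Set.add chain x) (tail ++ pvLinks master_cache x)]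
      rw [List.append_assoc]

theorem pvBFS_eq_pvLoop (master_cache : List (String × List (String × List (List (String × String))))) :
    ∀ (N : Nat) (chain : PySem.Set String) (q : List String),
      pvW master_cache chain + q.length ≤ N →
      pvBFS master_cache chain q = pvLoop master_cache chain q := by
  intro N
  induction N with
  | zero =>
    intro chain q h
    have : q = [] := List.eq_nil_of_length_eq_zero (by omega)
    subst this
    rw [pvBFS, pvLoop]
  | succ N ih =>
    intro chain q h
    cases q with
    | nil => rw [pvBFS, pvLoop]
    | cons x rest =>
      have hb := pvBFS_batch master_cache (x :: rest) chain []
      simp only [List.append_nil, List.nil_append] at hb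
      rw [hb, pvLoop]
      apply ih
      have := pvStepW master_cache (x :: rest) chain
      simp only [List.length_cons] at h
      omega

-- a non-key has no links
theorem pvLinks_not_key (master_cache : List (String × List (String × List (List (String × String))))) (x : String)
    (hx : x ∉ master_cache.map Prod.fst) : pvLinks master_cache x = [] := by
  have hget : PySem.Dict.get? (PySem.Dict.mk master_cache) x = none := by
    rw [PySem.Dict.get?_eq_none_iff_not_mem_keys]
    simpa [pysem] using hx
  unfold pvLinks
  rw [PySem.Dict.getD_of_get?_eq_none _ _ hget]
  simp [pysem]

-- update by elements already present is the identity
theorem pvUpdate_of_subset {s : PySem.Set String} {xs : List String} (h : ∀ x ∈ xs, x ∈ s) :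
    PySem.Set.update s xs = s := by
  rw [PySem.Set.update_eq_append_filter]
  have : (PySem.Set.ofList xs).filter (fun y => !(PySem.Set.contains s y)) = [] := by
    rw [List.filter_eq_nil_iff]
    intro y hy
    have : y ∈ s := h y (by simpa [PySem.Set.mem_ofList] using hy)
    simp [this]
  rw [this, List.append_nil]

-- a closed nodup chain is a fixpoint of pvGrow
theorem pvGrow_of_closed (master_cache : List (String × List (String × List (List (String × String))))) (L : List String)
    (hnd : L.Nodup) (hcl : pvLinked master_cache L L) : pvGrow master_cache L = L := by
  unfold pvGrow
  rw [PySem.List.dedup_eq_ofList, PySem.Set.ofList_append, PySem.Set.ofList_eq_self_of_nodup _ hnd]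
  apply pvUpdate_of_subset
  intro y hy
  rcases List.mem_flatMap.mp hy with ⟨x, hxL, hylink⟩
  exact hcl x hxL y hylink

theorem pvSatRounds_fix (master_cache : List (String × List (String × List (List (String × String))))) (k : Nat) (L : List String)
    (hnd : L.Nodup) (hcl : pvLinked master_cache L L) : pvSatRounds master_cache k L = L := by
  induction k with
  | zero => rfl
  | succ k ih => rw [pvSatRounds, pvGrow_of_closed master_cache L hnd hcl]; exact ih

-- the list of genuinely new elements a frontier contributes, in order
def pvFresh (chain : PySem.Set String) : List String → List String
  | [] => []
  | x :: rest =>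
    if PySem.Set.contains chain x then pvFresh chain rest
    else x :: pvFresh (PySem.Set.add chain x) rest

theorem pvUpdate_eq_append_fresh (chain : PySem.Set String) (q : List String) :
    PySem.Set.update chain q = chain ++ pvFresh chain q := by
  induction q generalizing chain with
  | nil => simp [pvFresh, PySem.Set.update]
  | cons x rest ih =>
    rw [PySem.Set.update_cons, pvFresh]
    by_cases h : x ∈ chain
    · rw [if_pos (by simpa using h), PySem.Set.add_of_mem h, ih]
    · rw [if_neg (by simpa using h), ih, PySem.Set.add_of_not_mem h, List.append_assoc, List.singleton_append]

theorem pvStep_fst (master_cache : List (String × List (String × List (List (String × String))))) (q : List String) (chain : PySem.Set String) :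
    (pvStep master_cache chain q).1 = PySem.Set.update chain q := by
  induction q generalizing chain with
  | nil => simp [pvStep, PySem.Set.update]
  | cons x rest ih =>
    rw [pvStep, PySem.Set.update_cons]
    by_cases h : x ∈ chain
    · rw [if_pos (by simpa using h), PySem.Set.add_of_mem h]; exact ih chain
    · rw [if_neg (by simpa using h)]; exact ih (PySem.Set.add chain x)

theorem pvStep_snd (master_cache : List (String × List (String × List (List (String × String))))) (q : List String) (chain : PySem.Set String) :
    (pvStep master_cache chain q).2 = (pvFresh chain q).flatMap (fun node => pvLinks master_cache node) := by
  induction q generalizing chain with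
  | nil => simp [pvStep, pvFresh]
  | cons x rest ih =>
    rw [pvStep, pvFresh]
    by_cases h : x ∈ chain
    · rw [if_pos (by simpa using h), if_pos (by simpa using h)]; exact ih chain
    · rw [if_neg (by simpa using h), if_neg (by simpa using h)]
      simp only [List.flatMap_cons]
      rw [ih (PySem.Set.add chain x)]

-- one pvGrow round simulates one pvStep pass on the (chain, frontier) decomposition
theorem pvGrow_step (master_cache : List (String × List (String × List (List (String × String))))) (chain : PySem.Set String) (frontier : List String)
    (hnd : chain.Nodup) (hH : pvLinked master_cache chain (PySem.Set.update chain frontier)) :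
    pvGrow master_cache (PySem.Set.update chain frontier)
      = PySem.Set.update (pvStep master_cache chain frontier).1 (pvStep master_cache chain frontier).2 := by
  rw [pvStep_fst, pvStep_snd]
  have hndL : (PySem.Set.update chain frontier).Nodup := PySem.Set.nodup_update chain frontier hnd
  unfold pvGrow
  rw [PySem.List.dedup_eq_ofList, PySem.Set.ofList_append, PySem.Set.ofList_eq_self_of_nodup _ hndL]
  rw [pvUpdate_eq_append_fresh chain frontier, List.flatMap_append, PySem.Set.update_append]
  have hsub : ∀ y ∈ chain.flatMap (fun node => pvLinks master_cache node), y ∈ chain ++ pvFresh chain frontier := by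
    intro y hy
    rcases List.mem_flatMap.mp hy with ⟨x, hxc, hyl⟩
    have := hH x hxc y hyl
    rwa [pvUpdate_eq_append_fresh] at this
  rw [pvUpdate_of_subset hsub, ← pvUpdate_eq_append_fresh]

-- the invariant `pvLinked chain' L'` survives one round
theorem pvLinked_step (master_cache : List (String × List (String × List (List (String × String))))) (chain : PySem.Set String) (frontier : List String)
    (hH : pvLinked master_cache chain (PySem.Set.update chain frontier)) :
    pvLinked master_cache (pvStep master_cache chain frontier).1
      (PySem.Set.update (pvStep master_cache chain frontier).1 (pvStep master_cache chain frontier).2) := by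
  rw [pvStep_fst, pvStep_snd]
  intro x hx y hyl
  rw [PySem.Set.mem_update]
  rw [pvUpdate_eq_append_fresh, List.mem_append] at hx
  rcases hx with hx | hx
  · left
    exact hH x hx y hyl
  · right
    exact List.mem_flatMap.mpr ⟨x, hx, hyl⟩

-- when the full reachability closure is reached, the BFS loop just returns it
theorem pvLoop_of_closed (master_cache : List (String × List (String × List (List (String × String))))) :
    ∀ (N : Nat) (chain : PySem.Set String) (frontier : List String),
      pvW master_cache chain + frontier.length ≤ N →
      chain.Nodup →
      pvLinked master_cache chain (PySem.Set.update chain frontier) →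
      pvLinked master_cache (PySem.Set.update chain frontier) (PySem.Set.update chain frontier) →
      pvLoop master_cache chain frontier = PySem.Set.update chain frontier := by
  intro N
  induction N with
  | zero =>
    intro chain frontier h _ _ _
    have : frontier = [] := List.eq_nil_of_length_eq_zero (by omega)
    subst this
    rw [pvLoop]; simp [PySem.Set.update]
  | succ N ih =>
    intro chain frontier h hnd hH hcl
    cases frontier with
    | nil => rw [pvLoop]; simp [PySem.Set.update]
    | cons f r =>
      rw [pvLoop]
      have hL : PySem.Set.update (pvStep master_cache chain (f :: r)).1 (pvStep master_cache chain (f :: r)).2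
          = PySem.Set.update chain (f :: r) := by
        rw [← pvGrow_step master_cache chain (f :: r) hnd hH]
        exact pvGrow_of_closed master_cache _ (PySem.Set.nodup_update chain (f :: r) hnd) hcl
      have hnd' : (pvStep master_cache chain (f :: r)).1.Nodup := by
        rw [pvStep_fst]; exact PySem.Set.nodup_update chain (f :: r) hnd
      have hH' := pvLinked_step master_cache chain (f :: r) hH
      have hcl' : pvLinked master_cache (PySem.Set.update (pvStep master_cache chain (f :: r)).1 (pvStep master_cache chain (f :: r)).2)
          (PySem.Set.update (pvStep master_cache chain (f :: r)).1 (pvStep master_cache chain (f :: r)).2) := by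
        rw [hL]; exact hcl
      have hmeas : pvW master_cache (pvStep master_cache chain (f :: r)).1 + (pvStep master_cache chain (f :: r)).2.length ≤ N := by
        have := pvStepW master_cache (f :: r) chain
        simp only [List.length_cons] at h
        omega
      rw [ih _ _ hmeas hnd' hH' hcl', hL]

-- number of distinct cache keys not yet collected
def pvKeysLeft (master_cache : List (String × List (String × List (List (String × String))))) (L : List String) : Nat :=
  ((PySem.List.dedup (master_cache.map Prod.fst)).filter (fun k => !(PySem.Set.contains L k))).length

theorem pvFilter_length_mono {l : List String} {p q : String → Bool}
    (himp : ∀ x ∈ l, q x = true → p x = true) :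
    (l.filter q).length ≤ (l.filter p).length := by
  induction l with
  | nil => simp
  | cons a l ih =>
    have ihl := ih (fun y hy => himp y (List.mem_cons_of_mem _ hy))
    rw [List.filter_cons, List.filter_cons]
    by_cases hqa : q a = true
    · rw [hqa, himp a List.mem_cons_self hqa]
      simpa using ihl
    · simp only [Bool.not_eq_true] at hqa
      rw [hqa]
      by_cases hpa : p a = true <;> simp [hpa] <;> omega

theorem pvFilter_length_lt {l : List String} {p q : String → Bool}
    (himp : ∀ x ∈ l, q x = true → p x = true) (hex : ∃ x ∈ l, p x = true ∧ q x = false) :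
    (l.filter q).length < (l.filter p).length := by
  induction l with
  | nil => rcases hex with ⟨x, hx, _⟩; cases hx
  | cons a l ih =>
    rcases hex with ⟨x, hx, hpx, hqx⟩
    have hmono : (l.filter q).length ≤ (l.filter p).length :=
      pvFilter_length_mono (fun y hy => himp y (List.mem_cons_of_mem _ hy))
    rcases List.mem_cons.mp hx with rfl | hxl
    · rw [List.filter_cons, List.filter_cons, hpx, hqx]
      simp only [Bool.false_eq_true, if_false, if_true, List.length_cons]
      omega
    · have ihl := ih (fun y hy => himp y (List.mem_cons_of_mem _ hy)) ⟨x, hxl, hpx, hqx⟩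
      rw [List.filter_cons, List.filter_cons]
      by_cases hqa : q a = true
      · rw [hqa, himp a List.mem_cons_self hqa]
        simpa using ihl
      · simp only [Bool.not_eq_true] at hqa
        rw [hqa]
        by_cases hpa : p a = true <;> simp [hpa] <;> omega

theorem pvGrow_subset (master_cache : List (String × List (String × List (List (String × String))))) (L : List String) :
    ∀ x ∈ L, x ∈ pvGrow master_cache L := by
  intro x hx
  unfold pvGrow
  rw [PySem.List.mem_dedup]
  exact List.mem_append_left _ hx

theorem pvGrow_links_subset (master_cache : List (String × List (String × List (List (String × String))))) (L : List String)
    {x y : String} (hx : x ∈ L) (hy : y ∈ pvLinks master_cache x) : y ∈ pvGrow master_cache L := by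
  unfold pvGrow
  rw [PySem.List.mem_dedup]
  exact List.mem_append_right _ (List.mem_flatMap.mpr ⟨x, hx, hy⟩)

-- enough saturation rounds reach a reachability-closed chain
theorem pvSatRounds_closed (master_cache : List (String × List (String × List (List (String × String))))) :
    ∀ (k : Nat) (L : List String), L.Nodup → pvKeysLeft master_cache L + 1 ≤ k →
      pvLinked master_cache (pvSatRounds master_cache k L) (pvSatRounds master_cache k L) := by
  intro k
  induction k with
  | zero => intro L _ h; omega
  | succ k ih =>
    intro L hnd hk
    by_cases hcl : pvLinked master_cache L L
    · rw [pvSatRounds_fix master_cache _ L hnd hcl]; exact hcl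
    · rw [pvSatRounds]
      have hnd1 : (pvGrow master_cache L).Nodup := by
        unfold pvGrow; rw [PySem.List.dedup_eq_ofList]; exact PySem.Set.nodup_ofList _
      by_cases hkey : ∃ x ∈ PySem.List.dedup (master_cache.map Prod.fst), x ∈ pvGrow master_cache L ∧ x ∉ L
      · apply ih _ hnd1
        have hlt : pvKeysLeft master_cache (pvGrow master_cache L) < pvKeysLeft master_cache L := by
          unfold pvKeysLeft
          apply pvFilter_length_lt
          · intro x _ hq
            simp only [Bool.not_eq_true'] at hq ⊢
            simp only [PySem.Set.contains_eq_listContains] at hq ⊢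
            simp only [List.contains_eq_mem, decide_eq_false_iff_not] at hq ⊢
            intro hxL
            exact hq (pvGrow_subset master_cache L x hxL)
          · rcases hkey with ⟨x, hxd, hxg, hxL⟩
            refine ⟨x, hxd, ?_, ?_⟩
            · simp [PySem.Set.contains_eq_listContains, hxL]
            · simp [PySem.Set.contains_eq_listContains, hxg]
        omega
      · have hcl1 : pvLinked master_cache (pvGrow master_cache L) (pvGrow master_cache L) := by
          intro x hxg y hyl
          by_cases hxL : x ∈ L
          · exact pvGrow_links_subset master_cache L hxL hyl
          · by_cases hxk : x ∈ PySem.List.dedup (master_cache.map Prod.fst)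
            · exact absurd ⟨x, hxk, hxg, hxL⟩ hkey
            · have : pvLinks master_cache x = [] := by
                apply pvLinks_not_key
                intro hmem
                exact hxk (by rwa [PySem.List.mem_dedup])
              rw [this] at hyl
              cases hyl
        rw [pvSatRounds_fix master_cache k _ hnd1 hcl1]
        exact hcl1

-- aligning the saturation rounds with the BFS loop, given the end state is closed
theorem pvSatRounds_eq_pvLoop (master_cache : List (String × List (String × List (List (String × String))))) :
    ∀ (k : Nat) (chain : PySem.Set String) (frontier : List String),
      chain.Nodup →
      pvLinked master_cache chain (PySem.Set.update chain frontier) →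
      pvLinked master_cache (pvSatRounds master_cache k (PySem.Set.update chain frontier)) (pvSatRounds master_cache k (PySem.Set.update chain frontier)) →
      pvSatRounds master_cache k (PySem.Set.update chain frontier) = pvLoop master_cache chain frontier := by
  intro k
  induction k with
  | zero =>
    intro chain frontier hnd hH hcl
    rw [pvSatRounds] at hcl ⊢
    exact (pvLoop_of_closed master_cache (pvW master_cache chain + frontier.length) chain frontier le_rfl hnd hH hcl).symm
  | succ k ih =>
    intro chain frontier hnd hH hcl
    rw [pvSatRounds] at hcl ⊢
    rw [pvGrow_step master_cache chain frontier hnd hH] at hcl ⊢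
    have hnd' : (pvStep master_cache chain frontier).1.Nodup := by
      rw [pvStep_fst]; exact PySem.Set.nodup_update chain frontier hnd
    rw [ih _ _ hnd' (pvLinked_step master_cache chain frontier hH) hcl]
    cases frontier with
    | nil => simp [pvStep]
    | cons f r => rw [pvLoop]

-- ===== VERDICT (by name: the statement is the Claim_ definition above) =====
theorem get_event_chain_spec : Claim_equal_get_event_chain := by
  intro start_id master_cache _
  unfold Spec_get_event_chain get_event_chain get_event_chain_alt
  by_cases h : PySem.Dict.contains (PySem.Dict.mk master_cache) start_id
  · simp only [h, Bool.not_true, Bool.false_eq_true, if_false]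
    have hupd : PySem.Set.update ([] : PySem.Set String) [start_id] = [start_id] := by
      rw [PySem.Set.update_nil_left]
      exact PySem.Set.ofList_eq_self_of_nodup _ (by simp)
    have hmem : start_id ∈ PySem.List.dedup (master_cache.map Prod.fst) := by
      rw [PySem.List.mem_dedup]
      have := h
      rw [PySem.Dict.contains_mk] at this
      rcases List.any_eq_true.mp this with ⟨p, hp, hpk⟩
      exact List.mem_map.mpr ⟨p, hp, by simpa using hpk⟩
    have hK : pvKeysLeft master_cache [start_id] + 1 ≤ PySem.Dict.size (PySem.Dict.mk master_cache) := by
      have h1 : pvKeysLeft master_cache [start_id] < (PySem.List.dedup (master_cache.map Prod.fst)).length := by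
        unfold pvKeysLeft
        have hsub : List.Sublist ((PySem.List.dedup (master_cache.map Prod.fst)).filter (fun k => !(PySem.Set.contains [start_id] k)))
            (PySem.List.dedup (master_cache.map Prod.fst)) := List.filter_sublist
        rcases Nat.lt_or_ge ((PySem.List.dedup (master_cache.map Prod.fst)).filter (fun k => !(PySem.Set.contains [start_id] k))).length
            (PySem.List.dedup (master_cache.map Prod.fst)).length with hlt | hge
        · exact hlt
        · exfalso
          have heq := List.Sublist.eq_of_length_le hsub hge
          have : start_id ∈ (PySem.List.dedup (master_cache.map Prod.fst)).filter (fun k => !(PySem.Set.contains [start_id] k)) := by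
            rw [heq]; exact hmem
          have := (List.mem_filter.mp this).2
          simp [PySem.Set.contains_eq_listContains] at this
      have h2 : (PySem.List.dedup (master_cache.map Prod.fst)).length ≤ master_cache.length := by
        rw [PySem.List.dedup_eq_ofList]
        calc (PySem.Set.ofList (master_cache.map Prod.fst)).length
            ≤ (master_cache.map Prod.fst).length := PySem.Set.length_ofList_le _
          _ = master_cache.length := List.length_map _
      have h3 : PySem.Dict.size (PySem.Dict.mk master_cache) = master_cache.length := by
        simp [PySem.Dict.size]
      omega
    have hcl := pvSatRounds_closed master_cache (PySem.Dict.size (PySem.Dict.mk master_cache)) [start_id] (by simp) hK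
    have hloop := pvSatRounds_eq_pvLoop master_cache (PySem.Dict.size (PySem.Dict.mk master_cache)) [] [start_id]
      (by simp) (by intro x hx; cases hx) (by rwa [hupd])
    rw [hupd] at hloop
    rw [hloop]
    exact pvBFS_eq_pvLoop master_cache (pvW master_cache PySem.Set.empty + 1) PySem.Set.empty [start_id] (by simp)
  · simp [h]
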